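-- pv_equiv track=rewrite | github.com/grapheneaffiliate/h4-polytopic-attention | solve_arc2_train_aa.py | solve_178fcbfb
-- ===== SOURCE A (Python) =====
-- def solve_178fcbfb(grid):
--     R, C = len(grid), len(grid[0])
--     dots = [(r,c,grid[r][c]) for r in range(R) for c in range(C) if grid[r][c] != 0]
--     out = [[0]*C for _ in range(R)]
--     for r,c,v in dots:
--         if v == 2:
--             for rr in range(R):
--                 out[rr][c] = 2
--     for r,c,v in dots:
--         if v in (1, 3):
--             for cc in range(C):
--                 out[r][cc] = v
--     return out
-- ===== SOURCE B (Python) =====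
-- def solve_178fcbfb(grid):
--     C = len(grid[0])
--     col2 = [2 if any(row[c] == 2 for row in grid) else 0 for c in range(C)]
--     out = []
--     for row in grid:
--         v = next((row[c] for c in range(C - 1, -1, -1) if row[c] in (1, 3)), 0)
--         out.append([v] * C if v != 0 else list(col2))
--     return out
-- ===== Notes on version B (the rewrite author's own statement) =====
-- stated objective: alternative
-- what changed: Instead of iterating over every nonzero cell and re-painting a whole column or row per marker, B computes once per column whether it contains a 2 and once per row the rightmost 1/3 marker, then emits each output row in one step.
import Mathlib
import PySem

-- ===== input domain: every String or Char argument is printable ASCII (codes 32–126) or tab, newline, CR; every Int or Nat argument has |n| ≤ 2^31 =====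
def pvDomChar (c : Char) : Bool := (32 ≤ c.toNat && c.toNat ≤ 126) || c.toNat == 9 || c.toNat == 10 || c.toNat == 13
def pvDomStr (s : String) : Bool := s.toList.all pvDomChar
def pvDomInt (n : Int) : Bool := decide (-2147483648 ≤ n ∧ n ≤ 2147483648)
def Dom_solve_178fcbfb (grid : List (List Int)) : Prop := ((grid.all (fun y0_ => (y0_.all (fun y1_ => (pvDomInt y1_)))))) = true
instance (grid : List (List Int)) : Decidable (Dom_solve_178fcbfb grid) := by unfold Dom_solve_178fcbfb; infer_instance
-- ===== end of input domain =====

-- B replaces the per-marker column/row repainting with one pass: per-column 2-presence and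
-- per-row rightmost 1/3 marker, emitting each output row at once (alternative algorithm).

-- ===== PORT A =====
def solve_178fcbfb (grid : List (List Int)) : List (List Int) :=
  let R := grid.length
  let C := (grid.headD []).length
  let dots : List (Nat × Nat × Int) :=
    (List.range R).flatMap (fun r =>
      (List.range C).filterMap (fun c =>
        let v := (grid.getD r []).getD c 0
        if v ≠ 0 then some (r, c, v) else none))
  let out0 : List (List Int) := List.replicate R (List.replicate C 0)
  let out1 := dots.foldl (fun out t =>
      if t.2.2 = 2 then out.map (fun row => row.set t.2.1 2) else out) out0
  let out2 := dots.foldl (fun out t =>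
      if t.2.2 = 1 ∨ t.2.2 = 3 then
        out.set t.1 ((List.range C).foldl (fun row cc => row.set cc t.2.2) (out.getD t.1 []))
      else out) out1
  out2

-- ===== PORT B =====
def solve_178fcbfb_alt (grid : List (List Int)) : List (List Int) :=
  let C := (grid.headD []).length
  let col2 : List Int :=
    (List.range C).map (fun c => if grid.any (fun row => row.getD c 0 == 2) then 2 else 0)
  grid.map (fun (row : List Int) =>
    let v : Int :=
      match (List.range C).reverse.find? (fun c => row.getD c 0 == 1 || row.getD c 0 == 3) with
      | some c => row.getD c 0
      | none => 0
    if v ≠ 0 then List.replicate C v else col2)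

-- ===== PRECONDITION & SPEC =====
-- Pre_ excludes exactly the inputs where Python A raises IndexError: the empty grid
-- (grid[0]) and ragged grids with a row shorter than the first row (grid[r][c]).
def Pre_solve_178fcbfb (grid : List (List Int)) : Prop :=
  grid ≠ [] ∧ ∀ row ∈ grid, (grid.headD []).length ≤ row.length
instance (grid : List (List Int)) : Decidable (Pre_solve_178fcbfb grid) := by
  unfold Pre_solve_178fcbfb; infer_instance
def pvWitness_solve_178fcbfb : List (List Int) := [[0, 2, 0], [1, 0, 0], [0, 0, 3]]

def Spec_solve_178fcbfb (grid : List (List Int)) (out : List (List Int)) : Prop := out = solve_178fcbfb_alt grid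
instance (grid : List (List Int)) (out : List (List Int)) : Decidable (Spec_solve_178fcbfb grid out) := by unfold Spec_solve_178fcbfb; infer_instance

-- ===== CLAIM (what is proved, stated in full; the proofs are below) =====
def Claim_equal_solve_178fcbfb : Prop := ∀ (grid : List (List Int)), Dom_solve_178fcbfb grid → Pre_solve_178fcbfb grid → Spec_solve_178fcbfb grid (solve_178fcbfb grid)

-- ===== LEMMAS AND PROOFS =====

-- fill a prefix of a row cell by cell = replicate ++ rest
theorem pv_fill_aux (v : Int) : ∀ (n : Nat) (row : List Int), n ≤ row.length →
    (List.range n).foldl (fun rw cc => rw.set cc v) row = List.replicate n v ++ row.drop n := by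
  intro n
  induction n with
  | zero => intro row _; simp
  | succ n ih =>
    intro row h
    rw [List.range_succ, List.foldl_append, ih row (by omega)]
    simp only [List.foldl_cons, List.foldl_nil]
    rw [List.set_append_right _ _ (by simp), List.length_replicate,
        List.drop_eq_getElem_cons (by omega : n < row.length), Nat.sub_self,
        List.replicate_succ', List.append_assoc]
    rfl

theorem pv_fill (v : Int) (row : List Int) :
    (List.range row.length).foldl (fun rw cc => rw.set cc v) row = List.replicate row.length v := by
  simpa using pv_fill_aux v row.length row le_rfl

theorem pv_fold2_replicate (ds : List (Nat × Nat × Int)) : ∀ (R : Nat) (r0 : List Int),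
    ds.foldl (fun out t => if t.2.2 = 2 then out.map (fun row => row.set t.2.1 2) else out)
      (List.replicate R r0)
    = List.replicate R (ds.foldl (fun row t => if t.2.2 = 2 then row.set t.2.1 2 else row) r0) := by
  induction ds with
  | nil => intro R r0; rfl
  | cons d ds ih =>
    intro R r0
    simp only [List.foldl_cons]
    by_cases h : d.2.2 = 2
    · simp only [if_pos h, List.map_replicate]; exact ih R _
    · simp only [if_neg h]; exact ih R r0

theorem pv_foldh2_get (ds : List (Nat × Nat × Int)) : ∀ (row : List Int) (c : Nat),
    (ds.foldl (fun row t => if t.2.2 = 2 then row.set t.2.1 2 else row) row)[c]?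
    = if (∃ t ∈ ds, t.2.1 = c ∧ t.2.2 = 2) ∧ c < row.length then some 2 else row[c]? := by
  induction ds with
  | nil => intro row c; simp
  | cons d ds ih =>
    intro row c
    rw [List.foldl_cons, ih]
    by_cases hv : d.2.2 = 2
    · rw [if_pos hv]
      by_cases hc : d.2.1 = c
      · by_cases hlt : c < row.length
        · have hrhs : (∃ t ∈ d :: ds, t.2.1 = c ∧ t.2.2 = 2) ∧ c < row.length :=
            ⟨⟨d, List.mem_cons_self, hc, hv⟩, hlt⟩
          rw [if_pos hrhs]
          by_cases hex : ∃ t ∈ ds, t.2.1 = c ∧ t.2.2 = 2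
          · rw [if_pos ⟨hex, by simpa [List.length_set] using hlt⟩]
          · rw [if_neg (by simp only [List.length_set]; exact fun hh => hex hh.1), hc,
                List.getElem?_set_self hlt]
        · rw [if_neg (by simp only [List.length_set]; exact fun hh => hlt hh.2),
              if_neg (fun hh => hlt hh.2), hc,
              List.getElem?_set, if_pos rfl, if_neg hlt, List.getElem?_eq_none (by omega)]
      · rw [List.getElem?_set_ne hc]
        refine if_congr (and_congr (Iff.intro ?_ ?_) (by simp)) rfl rfl
        · rintro ⟨t, ht, h1, h2⟩; exact ⟨t, List.mem_cons_of_mem _ ht, h1, h2⟩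
        · rintro ⟨t, ht, h1, h2⟩
          rcases List.mem_cons.mp ht with rfl | ht'
          · exact absurd h1 hc
          · exact ⟨t, ht', h1, h2⟩
    · rw [if_neg hv]
      refine if_congr (and_congr_left' (Iff.intro ?_ ?_)) rfl rfl
      · rintro ⟨t, ht, h1, h2⟩; exact ⟨t, List.mem_cons_of_mem _ ht, h1, h2⟩
      · rintro ⟨t, ht, h1, h2⟩
        rcases List.mem_cons.mp ht with rfl | ht'
        · exact absurd h2 hv
        · exact ⟨t, ht', h1, h2⟩

theorem pv_foldg13_get (C : Nat) (ds : List (Nat × Nat × Int)) : ∀ (out : List (List Int)),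
    (∀ row ∈ out, row.length = C) → ∀ (r : Nat),
    (ds.foldl (fun out t =>
       if t.2.2 = 1 ∨ t.2.2 = 3 then
         out.set t.1 ((List.range C).foldl (fun row cc => row.set cc t.2.2) (out.getD t.1 []))
       else out) out)[r]?
    = match (ds.filter (fun t => decide ((t.2.2 = (1:Int) ∨ t.2.2 = 3) ∧ t.1 = r))).getLast? with
      | some t => if r < out.length then some (List.replicate C t.2.2) else none
      | none => out[r]? := by
  induction ds with
  | nil => intro out _ r; simp
  | cons d ds ih =>
    intro out hlen r
    rw [List.foldl_cons, List.filter_cons]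
    by_cases hp : d.2.2 = 1 ∨ d.2.2 = 3
    · rw [if_pos hp]
      by_cases hd : d.1 < out.length
      · have hrow : out.getD d.1 [] = out[d.1] := by
          rw [List.getD_eq_getElem?_getD, List.getElem?_eq_getElem hd]; rfl
        have hrl : (out[d.1]).length = C := hlen _ (List.getElem_mem hd)
        have hfill : (List.range C).foldl (fun row cc => row.set cc d.2.2) (out.getD d.1 [])
            = List.replicate C d.2.2 := by
          rw [hrow, ← hrl, pv_fill]
        rw [hfill]
        have hlen' : ∀ row ∈ out.set d.1 (List.replicate C d.2.2), row.length = C := by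
          intro row hmem
          rcases List.mem_or_eq_of_mem_set hmem with h | rfl
          · exact hlen _ h
          · exact List.length_replicate
        rw [ih _ hlen' r]
        by_cases hdr : d.1 = r
        · subst hdr
          rw [if_pos (by simp [hp])]
          cases hl : (ds.filter (fun t => decide ((t.2.2 = (1:Int) ∨ t.2.2 = 3) ∧ t.1 = d.1))).getLast? with
          | some t =>
            rw [List.getLast?_cons, hl]
            simp only [Option.getD_some]
            rw [List.length_set]
          | none =>
            rw [List.getLast?_cons, hl]
            simp only [Option.getD_none]
            rw [List.getElem?_set_self hd, if_pos hd]
        · rw [if_neg (by simp [hdr])]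
          cases hl : (ds.filter (fun t => decide ((t.2.2 = (1:Int) ∨ t.2.2 = 3) ∧ t.1 = r))).getLast? with
          | some t => rw [List.length_set]
          | none => rw [List.getElem?_set_ne hdr]
      · rw [List.set_eq_of_length_le (by omega), ih out hlen r]
        by_cases hdr : d.1 = r
        · subst hdr
          rw [if_pos (by simp [hp])]
          cases hl : (ds.filter (fun t => decide ((t.2.2 = (1:Int) ∨ t.2.2 = 3) ∧ t.1 = d.1))).getLast? with
          | some t =>
            rw [List.getLast?_cons, hl]
            simp only [Option.getD_some]
          | none =>
            rw [List.getLast?_cons, hl]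
            simp only [Option.getD_none]
            rw [if_neg hd, List.getElem?_eq_none (by omega)]
        · rw [if_neg (by simp [hdr])]
    · rw [if_neg hp, if_neg (by simp [hp]), ih out hlen r]

theorem pv_filter_filterMap {α β : Type} (p : β → Bool) (f : α → Option β) : ∀ (l : List α),
    (l.filterMap f).filter p = l.filterMap (fun a =>
      match f a with
      | some b => if p b then some b else none
      | none => none) := by
  intro l
  induction l with
  | nil => rfl
  | cons a l ih =>
    cases h : f a with
    | none => simp [h, ih]
    | some b =>
      by_cases hp : p b <;> simp [h, hp, ih]

theorem pv_flatMap_single {β : Type} (L : List β) (r : Nat) : ∀ (R : Nat),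
    (List.range R).flatMap (fun r' => if r' = r then L else []) = if r < R then L else [] := by
  intro R
  induction R with
  | zero => simp
  | succ R ih =>
    rw [List.range_succ, List.flatMap_append, ih]
    by_cases hR : R = r
    · subst hR
      rw [if_neg (by omega), if_pos (by omega)]
      simp
    · rw [List.flatMap_cons]
      simp only [if_neg hR, List.flatMap_nil, List.append_nil]
      by_cases hlt : r < R
      · rw [if_pos hlt, if_pos (by omega)]
      · rw [if_neg hlt, if_neg (by omega)]

theorem pv_head?_filterMap {α β : Type} (f : α → Option β) : ∀ (l : List α),
    (l.filterMap f).head? = l.findSome? f := by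
  intro l
  induction l with
  | nil => rfl
  | cons a l ih =>
    cases h : f a with
    | none => simp [h, ih]
    | some b => simp [h]

theorem pv_getLast?_filterMap {α β : Type} (f : α → Option β) (l : List α) :
    (l.filterMap f).getLast? = l.reverse.findSome? f := by
  rw [List.getLast?_eq_head?_reverse, ← List.filterMap_reverse, pv_head?_filterMap]

theorem pv_findSome?_ite {α β : Type} (p : α → Prop) [DecidablePred p] (g : α → β) : ∀ (l : List α),
    (l.findSome? (fun a => if p a then some (g a) else none))
      = (l.find? (fun a => decide (p a))).map g := by
  intro l
  induction l with
  | nil => rfl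
  | cons a l ih =>
    by_cases hp : p a <;> simp [hp, ih]

theorem pv_getD_eq (grid : List (List Int)) (r : Nat) (hr : r < grid.length) :
    grid.getD r [] = grid[r] := by
  rw [List.getD_eq_getElem?_getD, List.getElem?_eq_getElem hr]; rfl

theorem pv_dots_mem (grid : List (List Int)) (t : Nat × Nat × Int) :
    (t ∈ (List.range grid.length).flatMap (fun r =>
        (List.range (grid.headD []).length).filterMap (fun c =>
          if (grid.getD r []).getD c 0 ≠ 0 then some (r, c, (grid.getD r []).getD c 0) else none)))
    ↔ ∃ r < grid.length, ∃ c < (grid.headD []).length,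
        (grid.getD r []).getD c 0 ≠ 0 ∧ t = (r, c, (grid.getD r []).getD c 0) := by
  simp only [List.mem_flatMap, List.mem_filterMap, List.mem_range,
    Option.ite_none_right_eq_some, Option.some_inj]
  constructor
  · rintro ⟨r, hr, c, hc, hne, heq⟩
    exact ⟨r, hr, c, hc, hne, heq.symm⟩
  · rintro ⟨r, hr, c, hc, hne, heq⟩
    exact ⟨r, hr, c, hc, hne, heq.symm⟩

theorem pv_dots_any2 (grid : List (List Int)) (c : Nat) (hc : c < (grid.headD []).length) :
    (∃ t ∈ (List.range grid.length).flatMap (fun r =>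
        (List.range (grid.headD []).length).filterMap (fun c' =>
          if (grid.getD r []).getD c' 0 ≠ 0 then some (r, c', (grid.getD r []).getD c' 0) else none)), t.2.1 = c ∧ t.2.2 = (2:Int))
    ↔ grid.any (fun row => row.getD c 0 == 2) = true := by
  rw [List.any_eq_true]
  constructor
  · rintro ⟨t, ht, h1, h2⟩
    rcases (pv_dots_mem grid t).mp ht with ⟨r, hr, c', hc', hne, rfl⟩
    refine ⟨grid[r], List.getElem_mem hr, ?_⟩
    have : c' = c := h1
    subst this
    rw [← pv_getD_eq grid r hr]
    simpa using h2
  · rintro ⟨row, hrow, hb⟩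
    rcases List.mem_iff_getElem.mp hrow with ⟨r, hr, rfl⟩
    have h2 : (grid.getD r []).getD c 0 = 2 := by
      rw [pv_getD_eq grid r hr]; exact beq_iff_eq.mp hb
    refine ⟨(r, c, (grid.getD r []).getD c 0),
      (pv_dots_mem grid _).mpr ⟨r, hr, c, hc, by rw [h2]; decide, rfl⟩, rfl, h2⟩

theorem pv_col2_eq (grid : List (List Int)) :
    ((List.range grid.length).flatMap (fun r =>
        (List.range (grid.headD []).length).filterMap (fun c =>
          if (grid.getD r []).getD c 0 ≠ 0 then some (r, c, (grid.getD r []).getD c 0) else none))).foldl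
        (fun row t => if t.2.2 = 2 then row.set t.2.1 2 else row)
        (List.replicate (grid.headD []).length 0)
    = (List.range (grid.headD []).length).map
        (fun c => if grid.any (fun row => row.getD c 0 == 2) then (2:Int) else 0) := by
  apply List.ext_getElem?
  intro i
  rw [pv_foldh2_get]
  by_cases hi : i < (grid.headD []).length
  · rw [List.getElem?_map, List.getElem?_range hi, Option.map_some]
    by_cases hany : grid.any (fun row => row.getD i 0 == 2) = true
    · rw [if_pos ⟨(pv_dots_any2 grid i hi).mpr hany, by simpa using hi⟩, if_pos hany]
    · rw [if_neg (fun hh => hany ((pv_dots_any2 grid i hi).mp hh.1)), if_neg hany,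
          List.getElem?_replicate, if_pos hi]
  · rw [if_neg (fun hh => hi (by simpa using hh.2)),
        List.getElem?_eq_none (by simpa using Nat.le_of_not_lt hi),
        List.getElem?_eq_none (by simp only [List.length_map, List.length_range]; omega)]

theorem pv_row13 (grid : List (List Int)) (r : Nat) (hr : r < grid.length) :
    ((List.range grid.length).flatMap (fun r' =>
        (List.range (grid.headD []).length).filterMap (fun c =>
          if (grid.getD r' []).getD c 0 ≠ 0 then some (r', c, (grid.getD r' []).getD c 0) else none))).filter
      (fun t => decide ((t.2.2 = (1:Int) ∨ t.2.2 = 3) ∧ t.1 = r))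
    = (List.range (grid.headD []).length).filterMap (fun c =>
        if (grid.getD r []).getD c 0 = 1 ∨ (grid.getD r []).getD c 0 = 3 then
          some (r, c, (grid.getD r []).getD c 0) else none) := by
  rw [List.filter_flatMap]
  have hpt : ∀ r' : Nat,
      (((List.range (grid.headD []).length).filterMap (fun c =>
          if (grid.getD r' []).getD c 0 ≠ 0 then some (r', c, (grid.getD r' []).getD c 0) else none)).filter
        (fun t => decide ((t.2.2 = (1:Int) ∨ t.2.2 = 3) ∧ t.1 = r)))
      = if r' = r then (List.range (grid.headD []).length).filterMap (fun c =>
          if (grid.getD r []).getD c 0 = 1 ∨ (grid.getD r []).getD c 0 = 3 then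
            some (r, c, (grid.getD r []).getD c 0) else none) else [] := by
    intro r'
    rw [pv_filter_filterMap]
    by_cases hrr : r' = r
    · subst hrr
      rw [if_pos rfl]
      apply List.filterMap_congr
      intro c _
      set x : Int := (grid.getD r' []).getD c 0 with hx
      by_cases h0 : x = 0
      · simp [h0]
      · by_cases h13 : x = 1 ∨ x = 3
        · simp [h0, h13]
        · simp [h0, h13]
    · rw [if_neg hrr]
      apply List.filterMap_eq_nil_iff.mpr
      intro c _
      set x : Int := (grid.getD r' []).getD c 0 with hx
      by_cases h0 : x = 0
      · simp [h0]
      · simp [h0, hrr]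
  simp only [hpt]
  rw [pv_flatMap_single, if_pos hr]

theorem pv_beq_pred (grid : List (List Int)) (r : Nat) (hr : r < grid.length) :
    (fun c : Nat => grid[r].getD c 0 == 1 || grid[r].getD c 0 == 3)
    = (fun c : Nat => decide ((grid.getD r []).getD c 0 = 1 ∨ (grid.getD r []).getD c 0 = 3)) := by
  funext c
  rw [pv_getD_eq grid r hr]
  set x : Int := grid[r].getD c 0 with hx
  by_cases h1 : x = 1 <;> by_cases h3 : x = 3 <;> simp [h1, h3]


theorem solve_178fcbfb_main : ∀ (grid : List (List Int)),
    solve_178fcbfb grid = solve_178fcbfb_alt grid := by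
  intro grid
  unfold solve_178fcbfb solve_178fcbfb_alt
  dsimp only
  rw [pv_fold2_replicate, pv_col2_eq]
  apply List.ext_getElem?
  intro r
  have hcl : ∀ row ∈ List.replicate grid.length
      ((List.range (grid.headD []).length).map
        (fun c => if grid.any (fun row => row.getD c 0 == 2) then (2:Int) else 0)),
      row.length = (grid.headD []).length := by
    intro row hrow
    rw [List.eq_of_mem_replicate hrow]
    simp
  rw [pv_foldg13_get _ _ _ hcl r]
  by_cases hr : r < grid.length
  · rw [pv_row13 grid r hr, pv_getLast?_filterMap, pv_findSome?_ite
        (p := fun c => (grid.getD r []).getD c 0 = 1 ∨ (grid.getD r []).getD c 0 = 3)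
        (g := fun c => (r, c, (grid.getD r []).getD c 0)),
      List.getElem?_map, List.getElem?_eq_getElem hr, Option.map_some]
    rw [pv_beq_pred grid r hr]
    cases hfind : ((List.range (grid.headD []).length).reverse.find?
        (fun c => decide ((grid.getD r []).getD c 0 = 1 ∨ (grid.getD r []).getD c 0 = 3))) with
    | none =>
      simp [hr]
    | some c =>
      have h13 : (grid.getD r []).getD c 0 = 1 ∨ (grid.getD r []).getD c 0 = 3 := by
        have hp := List.find?_some hfind
        simpa using hp
      have hne : grid[r].getD c 0 ≠ 0 := by
        rw [← pv_getD_eq grid r hr]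
        rcases h13 with h | h <;> rw [h] <;> decide
      simp [hr]
      intro h0
      rw [List.getD_eq_getElem?_getD] at hne
      exact absurd h0 hne
  · apply Eq.trans (b := (none : Option (List Int)))
    · split
      · rw [if_neg (by simp only [List.length_replicate]; omega)]
      · exact List.getElem?_eq_none (by simp only [List.length_replicate]; omega)
    · exact (List.getElem?_eq_none (by simp only [List.length_map]; omega)).symm


-- ===== VERDICT (by name: the statement is the Claim_ definition above) =====
theorem solve_178fcbfb_spec : Claim_equal_solve_178fcbfb := by
  intro grid _ _
  exact solve_178fcbfb_main grid
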